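-- pv_equiv track=rewrite | github.com/daniyalkabir/CSE-231-Python-Projects- | proj08.py | get_genre_data
-- ===== SOURCE A (Python) =====
-- from operator import itemgetter
--
-- def get_genre_data(D2, year):
--     D = {}
--     for k in D2.keys():
--         for e in D2[k]:
--             if e[1] == year:
--                 if not e[0] in D:
--
--                     tup = (e[0], 1, e[2],e[3],e[4],e[5],e[6])
--                     D[e[0]] = tup
--
--                 else:
--                     tup = D[e[0]]
--                     tup = (tup[0], int(tup[1]) + 1, tup[2] + e[2], tup[3] + e[3] ,tup[4] + e[4] , tup[5] + e[5] , tup[6] + e[6])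
--                     D[e[0]] = tup
--     l1=[]
--     for k in D.values():
--         l1.append(k)
--     l1.sort()  # sorting according to the genre
--     l1.sort(key=itemgetter(-1), reverse=True)
--     return l1
-- ===== SOURCE B (Python) =====
-- from operator import itemgetter
--
-- def get_genre_data(D2, year):
--     # group-then-reduce: flatten+filter once, bucket entries by genre, then
--     # aggregate each bucket in one comprehension; same final two-stage sort.
--     rows = [e for entries in D2.values() for e in entries if e[1] == year]
--     buckets = {}
--     for e in rows:
--         buckets.setdefault(e[0], []).append(e)
--     l1 = [(g, len(b),
--            sum(x[2] for x in b), sum(x[3] for x in b),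
--            sum(x[4] for x in b), sum(x[5] for x in b),
--            sum(x[6] for x in b))
--           for g, b in buckets.items()]
--     l1.sort()
--     l1.sort(key=itemgetter(-1), reverse=True)
--     return l1
-- ===== Notes on version B (the rewrite author's own statement) =====
-- stated objective: alternative
-- what changed: Replaces A's single-pass running accumulation with its first-seen-vs-increment branch by a group-then-reduce decomposition: one flatten-and-filter comprehension, one setdefault bucketing pass keyed by genre, then a comprehension that aggregates each bucket with len and five sums; the final two-stage sort is unchanged.
import Mathlib
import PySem

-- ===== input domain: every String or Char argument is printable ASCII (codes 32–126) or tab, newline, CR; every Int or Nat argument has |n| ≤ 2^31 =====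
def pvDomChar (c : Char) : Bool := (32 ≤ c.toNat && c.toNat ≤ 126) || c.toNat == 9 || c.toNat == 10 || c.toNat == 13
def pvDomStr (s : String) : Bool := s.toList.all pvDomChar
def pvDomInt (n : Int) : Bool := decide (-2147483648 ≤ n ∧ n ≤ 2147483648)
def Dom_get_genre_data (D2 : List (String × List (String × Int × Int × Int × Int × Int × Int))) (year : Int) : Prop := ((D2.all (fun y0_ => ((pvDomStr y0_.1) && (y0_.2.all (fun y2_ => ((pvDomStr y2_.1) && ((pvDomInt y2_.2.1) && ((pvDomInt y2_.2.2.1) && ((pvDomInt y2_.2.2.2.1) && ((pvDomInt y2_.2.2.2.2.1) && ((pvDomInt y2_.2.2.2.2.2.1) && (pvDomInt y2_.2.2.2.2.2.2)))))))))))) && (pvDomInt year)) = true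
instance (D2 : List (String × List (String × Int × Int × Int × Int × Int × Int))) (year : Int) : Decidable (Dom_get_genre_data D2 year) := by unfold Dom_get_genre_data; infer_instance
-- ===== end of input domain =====

-- B replaces A's running accumulate-or-init branch by group-then-reduce (bucket entries by
-- genre, then aggregate each bucket once); same two-stage sort; objective: alternative decomposition.


-- ===== PORT A =====
-- the body of A's `if e[1] == year:` block (the first-seen/accumulate branch)
def pvAUpd (D : PySem.Dict String (String × Int × Int × Int × Int × Int × Int))
    (e : String × Int × Int × Int × Int × Int × Int) :
    PySem.Dict String (String × Int × Int × Int × Int × Int × Int) :=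
  if !(D.contains e.1) then
    D.insert e.1 (e.1, 1, e.2.2.1, e.2.2.2.1, e.2.2.2.2.1, e.2.2.2.2.2.1, e.2.2.2.2.2.2)
  else
    -- tup = D[e[0]]: the key is present (contains was just checked), so the getD default is never read
    let tup := D.getD e.1 (e.1, 0, 0, 0, 0, 0, 0)
    D.insert e.1 (tup.1, tup.2.1 + 1, tup.2.2.1 + e.2.2.1, tup.2.2.2.1 + e.2.2.2.1,
      tup.2.2.2.2.1 + e.2.2.2.2.1, tup.2.2.2.2.2.1 + e.2.2.2.2.2.1, tup.2.2.2.2.2.2 + e.2.2.2.2.2.2)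

-- one step of A's inner loop
def pvAStep (year : Int) (D : PySem.Dict String (String × Int × Int × Int × Int × Int × Int))
    (e : String × Int × Int × Int × Int × Int × Int) :
    PySem.Dict String (String × Int × Int × Int × Int × Int × Int) :=
  if e.2.1 == year then pvAUpd D e else D

def get_genre_data (D2 : List (String × List (String × Int × Int × Int × Int × Int × Int))) (year : Int) : List (String × Int × Int × Int × Int × Int × Int) :=
  let d2 := PySem.Dict.ofList D2
  -- for k in D2.keys(): for e in D2[k]: … — a dict's keys paired with their lookups are its items
  let D := d2.items.foldl (fun D p => p.2.foldl (pvAStep year) D) PySem.Dict.empty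
  let l1 := D.values.foldl (fun l k => l ++ [k]) []
  -- l1.sort(): the tuples' first components (the dict's keys) are distinct, so Python's
  -- lexicographic tuple sort never reads past the genre string; String '<' is Python's
  let l1 := PySem.List.sorted l1 (fun t => t.1) false
  PySem.List.sorted l1 (fun t => t.2.2.2.2.2.2) true

-- ===== PORT B =====
-- the aggregated tuple for one bucket (genre, len, five field sums), as Source B's comprehension builds it
def pvReduce (p : String × List (String × Int × Int × Int × Int × Int × Int)) :
    String × Int × Int × Int × Int × Int × Int :=
  (p.1, (p.2.length : Int), (p.2.map (·.2.2.1)).sum, (p.2.map (·.2.2.2.1)).sum,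
   (p.2.map (·.2.2.2.2.1)).sum, (p.2.map (·.2.2.2.2.2.1)).sum, (p.2.map (·.2.2.2.2.2.2)).sum)

def get_genre_data_alt (D2 : List (String × List (String × Int × Int × Int × Int × Int × Int))) (year : Int) : List (String × Int × Int × Int × Int × Int × Int) :=
  let d2 := PySem.Dict.ofList D2
  let rows := d2.values.flatMap (fun entries => entries.filter (fun e => e.2.1 == year))
  -- buckets.setdefault(e[0], []).append(e)  =  buckets[e[0]] = buckets.get(e[0], []) + [e]
  let buckets := rows.foldl (fun b e => b.modify e.1 [] (· ++ [e])) PySem.Dict.empty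
  let l1 := buckets.items.map pvReduce
  -- l1.sort(): genres (bucket keys) are distinct, so the tuple sort is the sort by genre
  let l1 := PySem.List.sorted l1 (fun t => t.1) false
  PySem.List.sorted l1 (fun t => t.2.2.2.2.2.2) true

-- ===== PRECONDITION & SPEC =====
-- DecidableEq for the 7-tuple (instance search needs help at this depth)
def pvDecEq7 : DecidableEq (String × Int × Int × Int × Int × Int × Int) :=
  @instDecidableEqProd _ _ _ (@instDecidableEqProd _ _ _ (@instDecidableEqProd _ _ _
    (@instDecidableEqProd _ _ _ (@instDecidableEqProd _ _ _ (@instDecidableEqProd _ _ _ inferInstance)))))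

def Spec_get_genre_data (D2 : List (String × List (String × Int × Int × Int × Int × Int × Int))) (year : Int) (out : List (String × Int × Int × Int × Int × Int × Int)) : Prop := out = get_genre_data_alt D2 year
instance (D2 : List (String × List (String × Int × Int × Int × Int × Int × Int))) (year : Int) (out : List (String × Int × Int × Int × Int × Int × Int)) : Decidable (Spec_get_genre_data D2 year out) := by unfold Spec_get_genre_data; exact @instDecidableEqList _ pvDecEq7 out (get_genre_data_alt D2 year)

-- ===== CLAIM (what is proved, stated in full; the proofs are below) =====
def Claim_equal_get_genre_data : Prop := ∀ (D2 : List (String × List (String × Int × Int × Int × Int × Int × Int))) (year : Int), Dom_get_genre_data D2 year → Spec_get_genre_data D2 year (get_genre_data D2 year)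

-- ===== LEMMAS AND PROOFS =====

-- an item of A's aggregate dict is the pvReduce image of the corresponding bucket item
def pvF (p : String × List (String × Int × Int × Int × Int × Int × Int)) :
    String × (String × Int × Int × Int × Int × Int × Int) := (p.1, pvReduce p)

theorem pvReduce_append (g : String) (es : List (String × Int × Int × Int × Int × Int × Int))
    (e : String × Int × Int × Int × Int × Int × Int) :
    pvReduce (g, es ++ [e]) =
      ((pvReduce (g, es)).1, (pvReduce (g, es)).2.1 + 1,
       (pvReduce (g, es)).2.2.1 + e.2.2.1, (pvReduce (g, es)).2.2.2.1 + e.2.2.2.1,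
       (pvReduce (g, es)).2.2.2.2.1 + e.2.2.2.2.1, (pvReduce (g, es)).2.2.2.2.2.1 + e.2.2.2.2.2.1,
       (pvReduce (g, es)).2.2.2.2.2.2 + e.2.2.2.2.2.2) := by
  simp [pvReduce]

-- a modify step keeps the bucket dict's keys unique
theorem pvNodupStep (dB : PySem.Dict String (List (String × Int × Int × Int × Int × Int × Int)))
    (e : String × Int × Int × Int × Int × Int × Int) (hnd : dB.keys.Nodup) :
    (dB.modify e.1 [] (· ++ [e])).keys.Nodup := by
  have : dB.modify e.1 [] (· ++ [e]) = dB.insert e.1 (dB.getD e.1 [] ++ [e]) := rfl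
  rw [this]
  exact PySem.Dict.nodup_keys_insert _ _ _ hnd

-- one parallel step of the two loops preserves the item relation
theorem pvStep (e : String × Int × Int × Int × Int × Int × Int)
    (dA : PySem.Dict String (String × Int × Int × Int × Int × Int × Int))
    (dB : PySem.Dict String (List (String × Int × Int × Int × Int × Int × Int)))
    (hnd : dB.keys.Nodup) (h : dA.items = dB.items.map pvF) :
    (pvAUpd dA e).items = (dB.modify e.1 [] (· ++ [e])).items.map pvF := by
  have hmod : dB.modify e.1 [] (· ++ [e]) = dB.insert e.1 (dB.getD e.1 [] ++ [e]) := rfl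
  have hkeys : dA.keys = dB.keys := by
    simp only [PySem.Dict.keys, h, List.map_map]; rfl
  have hc : dA.contains e.1 = dB.contains e.1 := by
    rw [PySem.Dict.contains_eq_decide_mem_keys, PySem.Dict.contains_eq_decide_mem_keys, hkeys]
  rw [hmod]
  by_cases hb : dB.contains e.1 = true
  · -- the genre already has a bucket / an aggregate
    have hA : dA.contains e.1 = true := by rw [hc]; exact hb
    have hndA : dA.keys.Nodup := hkeys ▸ hnd
    obtain ⟨v, hv⟩ : ∃ v, dB.get? e.1 = some v := by
      have := PySem.Dict.contains_eq_isSome_get? (d := dB) (k := e.1)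
      rw [hb] at this
      exact Option.isSome_iff_exists.mp this.symm
    have hvmem : (e.1, v) ∈ dB.items := PySem.Dict.mem_items_of_get?_eq_some dB hv
    have hgB : dB.getD e.1 [] = v := PySem.Dict.getD_of_mem_items dB hvmem hnd []
    have hvA : (e.1, pvReduce (e.1, v)) ∈ dA.items := by
      rw [h]; exact List.mem_map_of_mem hvmem
    have hgA : dA.getD e.1 (e.1, 0, 0, 0, 0, 0, 0) = pvReduce (e.1, v) :=
      PySem.Dict.getD_of_mem_items dA hvA hndA _
    rw [pvAUpd, hA]
    simp only [Bool.not_true, Bool.false_eq_true, if_false]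
    rw [PySem.Dict.items_insert_of_contains _ _ hA,
        PySem.Dict.items_insert_of_contains _ _ hb, h, List.map_map, List.map_map]
    apply List.map_congr_left
    intro p hp
    by_cases hpk : p.1 = e.1
    · have hp' : (e.1, p.2) ∈ dB.items := by rw [← hpk]; exact hp
      have : dB.getD e.1 [] = p.2 := PySem.Dict.getD_of_mem_items dB hp' hnd []
      have hvp : v = p.2 := by rw [← hgB, this]
      simp only [Function.comp_apply, pvF, hpk, BEq.rfl, hgA, hgB, hvp]
      have := pvReduce_append e.1 p.2 e
      simp only [pvReduce] at this ⊢
      simp_all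
    · have hne : (p.1 == e.1) = false := by simpa using hpk
      simp only [Function.comp_apply, pvF, hne, Bool.false_eq_true, if_false]
  · -- first entry of this genre
    have hb' : dB.contains e.1 = false := by simpa using hb
    have hA : dA.contains e.1 = false := by rw [hc]; exact hb'
    rw [pvAUpd, hA]
    simp only [Bool.not_false, if_true]
    rw [PySem.Dict.getD_of_not_contains dB [] hb']
    rw [PySem.Dict.items_insert_of_not_contains _ _ hA,
        PySem.Dict.items_insert_of_not_contains _ _ hb', h, List.map_append]
    simp [pvF, pvReduce]

-- the loop invariant: A's aggregate dict is pointwise pvF of B's bucket dict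
theorem pvItems_rel :
    ∀ (L : List (String × Int × Int × Int × Int × Int × Int))
      (dA : PySem.Dict String (String × Int × Int × Int × Int × Int × Int))
      (dB : PySem.Dict String (List (String × Int × Int × Int × Int × Int × Int))),
      dB.keys.Nodup → dA.items = dB.items.map pvF →
      (L.foldl pvAUpd dA).items =
        (L.foldl (fun b e => b.modify e.1 [] (· ++ [e])) dB).items.map pvF := by
  intro L
  induction L with
  | nil => intro dA dB _ h; simpa using h
  | cons e L ih =>
    intro dA dB hnd h
    exact ih _ _ (pvNodupStep dB e hnd) (pvStep e dA dB hnd h)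

-- ===== VERDICT =====
theorem get_genre_data_spec : Claim_equal_get_genre_data := by
  intro D2 year _
  unfold Spec_get_genre_data get_genre_data get_genre_data_alt
  have hrows : (PySem.Dict.ofList D2).values.flatMap
        (fun entries => entries.filter (fun e => e.2.1 == year)) =
      ((PySem.Dict.ofList D2).items.flatMap (·.2)).filter (fun e => e.2.1 == year) := by
    rw [List.filter_flatMap]
    simp only [PySem.Dict.values, List.flatMap_map]
  have hfoldA : (PySem.Dict.ofList D2).items.foldl
        (fun D p => p.2.foldl (pvAStep year) D) PySem.Dict.empty =
      (((PySem.Dict.ofList D2).items.flatMap (·.2)).filter (fun e => e.2.1 == year)).foldl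
        pvAUpd PySem.Dict.empty := by
    rw [← List.foldl_flatMap]
    rw [show (pvAStep year) = (fun D e => if e.2.1 == year then pvAUpd D e else D) from rfl]
    rw [PySem.List.foldl_if_eq_foldl_filter]
  have hitems := pvItems_rel
    (((PySem.Dict.ofList D2).items.flatMap (·.2)).filter (fun e => e.2.1 == year))
    PySem.Dict.empty PySem.Dict.empty (by rw [PySem.Dict.keys_empty]; exact List.nodup_nil) (by rfl)
  have hl1 : ((PySem.Dict.ofList D2).items.foldl
        (fun D p => p.2.foldl (pvAStep year) D) PySem.Dict.empty).values.foldl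
          (fun l k => l ++ [k]) [] =
      ((((PySem.Dict.ofList D2).items.flatMap (·.2)).filter (fun e => e.2.1 == year)).foldl
        (fun b e => b.modify e.1 [] (· ++ [e])) PySem.Dict.empty).items.map pvReduce := by
    rw [PySem.List.foldl_append_singleton_eq_self, List.nil_append, hfoldA]
    simp only [PySem.Dict.values, hitems, List.map_map]
    rfl
  simp only [hrows, hl1]
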